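-- pv_equiv track=rewrite | github.com/jayshaffer/topcoder | TurretDefense/solution.py | firstMiss
-- ===== SOURCE A (Python) =====
-- def firstMiss(xs, ys, times):
--     x1 = 0
--     y1 = 0
--     time = 0
--     for i in range(len(xs)):
--         x2 = xs[i]
--         y2 = ys[i]
--         dist = abs(x2 - x1) + abs(y2 - y1)
--         if(times[i] < time + dist):
--             return i
--         x1 = x2
--         y1 = y2
--         time = times[i]
--     return -1
-- ===== SOURCE B (Python) =====
-- def firstMiss(xs, ys, times):
--     n = len(xs)
--     earliest = []
--     for i in range(n):
--         px = xs[i - 1] if i else 0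
--         py = ys[i - 1] if i else 0
--         pt = times[i - 1] if i else 0
--         earliest.append(pt + abs(xs[i] - px) + abs(ys[i] - py))
--     for i in range(n):
--         if times[i] < earliest[i]:
--             return i
--     return -1
-- ===== Notes on version B (the rewrite author's own statement) =====
-- stated objective: alternative
-- what changed: Replaces A's single loop carrying running state (x1, y1, time) with a stateless two-pass decomposition: first build a table of earliest-possible arrival times, then scan for the first index where times[i] falls short.
-- outside the precondition, e.g. on firstMiss([5, 6], [5], [0]): A returns 0, B raises IndexError
import Mathlib
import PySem

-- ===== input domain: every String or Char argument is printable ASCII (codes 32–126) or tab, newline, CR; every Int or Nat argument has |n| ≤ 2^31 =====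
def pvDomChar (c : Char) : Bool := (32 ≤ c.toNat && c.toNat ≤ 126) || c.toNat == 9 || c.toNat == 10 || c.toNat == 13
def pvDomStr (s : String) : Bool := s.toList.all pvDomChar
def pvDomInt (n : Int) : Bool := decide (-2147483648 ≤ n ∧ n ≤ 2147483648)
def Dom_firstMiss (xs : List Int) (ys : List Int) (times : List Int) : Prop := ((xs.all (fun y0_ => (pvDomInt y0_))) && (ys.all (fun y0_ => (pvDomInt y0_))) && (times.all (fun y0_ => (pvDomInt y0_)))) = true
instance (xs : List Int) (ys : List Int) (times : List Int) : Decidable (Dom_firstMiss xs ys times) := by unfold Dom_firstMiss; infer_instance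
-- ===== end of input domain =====

-- B replaces A's single loop with running state by a table of earliest-arrival times
-- built in a first pass and a plain first-index search in a second pass (objective: alternative).

-- ===== PORT A =====
-- A's loop over i in range(len(xs)) with running state (x1, y1, time).
def firstMissGo (xs ys times : List Int) (n i : Nat) (x1 y1 time : Int) : Int :=
  if _h : i < n then
    let x2 := PySem.List.pyGetD xs (i : Int) 0
    let y2 := PySem.List.pyGetD ys (i : Int) 0
    let dist := |x2 - x1| + |y2 - y1|
    if PySem.List.pyGetD times (i : Int) 0 < time + dist then (i : Int)
    else firstMissGo xs ys times n (i + 1) x2 y2 (PySem.List.pyGetD times (i : Int) 0)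
  else -1
termination_by n - i

def firstMiss (xs : List Int) (ys : List Int) (times : List Int) : Int :=
  firstMissGo xs ys times xs.length 0 0 0 0

-- ===== PORT B =====
-- earliest[i] = (times[i-1] if i else 0) + |xs[i]-px| + |ys[i]-py|
def earliestAt (xs ys times : List Int) (i : Nat) : Int :=
  let px := if i = 0 then 0 else PySem.List.pyGetD xs ((i : Int) - 1) 0
  let py := if i = 0 then 0 else PySem.List.pyGetD ys ((i : Int) - 1) 0
  let pt := if i = 0 then 0 else PySem.List.pyGetD times ((i : Int) - 1) 0
  pt + |PySem.List.pyGetD xs (i : Int) 0 - px| + |PySem.List.pyGetD ys (i : Int) 0 - py|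

-- first pass: the table 'earliest' (Source B's append loop as a map over range(n))
def firstMissTable (xs ys times : List Int) : List Int :=
  (List.range xs.length).map (earliestAt xs ys times)

-- second pass: first index i with times[i] < earliest[i], else -1
def firstMissFind (times earliest : List Int) (n i : Nat) : Int :=
  if _h : i < n then
    if PySem.List.pyGetD times (i : Int) 0 < PySem.List.pyGetD earliest (i : Int) 0 then (i : Int)
    else firstMissFind times earliest n (i + 1)
  else -1
termination_by n - i

def firstMiss_alt (xs : List Int) (ys : List Int) (times : List Int) : Int :=
  firstMissFind times (firstMissTable xs ys times) xs.length 0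

-- ===== PRECONDITION & SPEC =====
-- Pre_ requires ys and times to be at least as long as xs: on shorter lists A either raises
-- IndexError or happens to return an early index before reaching the missing element, while
-- B's full table build raises IndexError.
def Pre_firstMiss (xs : List Int) (ys : List Int) (times : List Int) : Prop :=
  xs.length ≤ ys.length ∧ xs.length ≤ times.length
instance (xs : List Int) (ys : List Int) (times : List Int) : Decidable (Pre_firstMiss xs ys times) := by unfold Pre_firstMiss; infer_instance

def pvWitness_firstMiss : List Int × List Int × List Int := ([0, 3, 3], [0, 0, 2], [5, 6, 20])

def Spec_firstMiss (xs : List Int) (ys : List Int) (times : List Int) (out : Int) : Prop := out = firstMiss_alt xs ys times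
instance (xs : List Int) (ys : List Int) (times : List Int) (out : Int) : Decidable (Spec_firstMiss xs ys times out) := by unfold Spec_firstMiss; infer_instance

-- ===== CLAIM (what is proved, stated in full; the proofs are below) =====
def Claim_equal_firstMiss : Prop := ∀ (xs : List Int) (ys : List Int) (times : List Int), Dom_firstMiss xs ys times → Pre_firstMiss xs ys times → Spec_firstMiss xs ys times (firstMiss xs ys times)

-- ===== LEMMAS AND PROOFS =====

-- the previous-point coordinates A carries as running state, expressed positionally
def prevOf (l : List Int) (i : Nat) : Int :=
  if i = 0 then 0 else PySem.List.pyGetD l ((i : Int) - 1) 0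

theorem table_get (xs ys times : List Int) {i : Nat} (hi : i < xs.length) :
    PySem.List.pyGetD (firstMissTable xs ys times) (i : Int) 0 = earliestAt xs ys times i := by
  unfold firstMissTable
  rw [PySem.List.pyGetD_natCast]
  simp [List.getD, hi]

theorem go_eq_find (xs ys times : List Int)
    (_hy : xs.length ≤ ys.length) (_ht : xs.length ≤ times.length) :
    ∀ (k i : Nat), xs.length - i = k →
      firstMissGo xs ys times xs.length i (prevOf xs i) (prevOf ys i) (prevOf times i)
        = firstMissFind times (firstMissTable xs ys times) xs.length i := by
  intro k
  induction k with
  | zero =>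
    intro i hk
    have hi : ¬ i < xs.length := by omega
    unfold firstMissGo firstMissFind
    simp [hi]
  | succ k ih =>
    intro i hk
    have hi : i < xs.length := by omega
    unfold firstMissGo firstMissFind
    rw [table_get xs ys times hi]
    simp only [hi, dif_pos]
    have harith :
        earliestAt xs ys times i =
          prevOf times i +
            (|PySem.List.pyGetD xs (i : Int) 0 - prevOf xs i| +
             |PySem.List.pyGetD ys (i : Int) 0 - prevOf ys i|) := by
      unfold earliestAt prevOf; ring
    rw [harith]
    split_ifs with hcond
    · rfl
    · have hstep : ∀ (l : List Int), PySem.List.pyGetD l (i : Int) 0 = prevOf l (i + 1) := by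
        intro l
        unfold prevOf
        simp only [Nat.succ_ne_zero]
        norm_num
      rw [hstep xs, hstep ys, hstep times]
      exact ih (i + 1) (by omega)

-- ===== VERDICT (by name: the statement is the Claim_ definition above) =====
theorem firstMiss_spec : Claim_equal_firstMiss := by
  intro xs ys times _hdom hpre
  unfold Spec_firstMiss firstMiss firstMiss_alt
  have := go_eq_find xs ys times hpre.1 hpre.2 xs.length 0 (by omega)
  simpa [prevOf] using this
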